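-- pv_equiv track=rewrite | github.com/neurify-goto/fs-runner | src/form_sender/analyzer/unmapped_element_handler.py | _choose_priority_index
-- ===== SOURCE A (Python) =====
-- from typing import Dict, List, Any, Optional, Callable, Awaitable, Tuple
--
-- def _choose_priority_index(
--     texts: List[str], pri1: List[str], pri2: List[str]
-- ) -> int:
--     def last_match(keys: List[str]) -> Optional[int]:
--         idxs = [i for i, t in enumerate(texts) if any(k in (t or "") for k in keys)]
--         return idxs[-1] if idxs else None
--
--     idx = last_match(pri1)
--     if idx is not None:
--         return idx
--     idx = last_match(pri2)
--     if idx is not None: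
--         return idx
--     return max(0, len(texts) - 1)
-- ===== SOURCE B (Python) =====
-- def _choose_priority_index(texts, pri1, pri2):
--     pending = None
--     for i in range(len(texts) - 1, -1, -1):
--         t = texts[i] or ""
--         if any(k in t for k in pri1):
--             return i
--         if pending is None and any(k in t for k in pri2):
--             pending = i
--     return pending if pending is not None else max(0, len(texts) - 1)
-- ===== Notes on version B (the rewrite author's own statement) =====
-- stated objective: faster
-- what changed: Replaced the two full forward enumerate-comprehensions (build pri1 index list, then pri2 list, take last) with a single reverse scan that returns immediately on the first pri1 hit from the end and keeps one pending pri2 candidate.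
import Mathlib
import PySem

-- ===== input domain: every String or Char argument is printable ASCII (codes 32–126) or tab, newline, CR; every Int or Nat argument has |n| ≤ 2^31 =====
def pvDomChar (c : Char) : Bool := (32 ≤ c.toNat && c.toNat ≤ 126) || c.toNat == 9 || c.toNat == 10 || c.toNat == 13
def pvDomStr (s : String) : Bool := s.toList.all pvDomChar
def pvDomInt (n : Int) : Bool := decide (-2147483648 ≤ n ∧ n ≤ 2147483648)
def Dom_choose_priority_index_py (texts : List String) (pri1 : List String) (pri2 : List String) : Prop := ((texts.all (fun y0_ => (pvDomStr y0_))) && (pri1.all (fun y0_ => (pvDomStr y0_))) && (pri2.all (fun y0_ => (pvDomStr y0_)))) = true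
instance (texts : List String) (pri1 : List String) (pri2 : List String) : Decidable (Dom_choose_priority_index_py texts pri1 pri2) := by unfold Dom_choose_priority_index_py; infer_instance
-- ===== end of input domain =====

-- B replaces A's two full forward enumerate-comprehensions by a single reverse scan with an
-- early return on a pri1 hit and one pending pri2 candidate (alternative decomposition, same cost class).


-- ===== PORT A =====
-- any(k in (t or "") for k in keys); for a Python str, (t or "") is t itself ("" or "" = ""), so it is the plain membership test
def pvAnyKeyIn (keys : List String) (t : String) : Bool :=
  keys.any (fun k => PySem.Str.isIn k t)

-- idxs = [i for i, t in enumerate(texts) if any(k in (t or "") for k in keys)]; idxs[-1] if idxs else None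
def pvLastMatch (texts : List String) (keys : List String) : Option Int :=
  let idxs := ((PySem.List.enumerate texts 0).filter (fun p => pvAnyKeyIn keys p.2)).map (·.1)
  idxs.getLast?

def choose_priority_index_py (texts : List String) (pri1 : List String) (pri2 : List String) : Int :=
  match pvLastMatch texts pri1 with
  | some i => i
  | none =>
    match pvLastMatch texts pri2 with
    | some i => i
    | none => max 0 ((texts.length : Int) - 1)

-- ===== PORT B =====
-- the reverse loop of Source B: for i from len-1 down to 0 over (i, texts[i]); return i on a pri1 hit,
-- store the first pri2 hit in `pending`, fall back to `dflt` = max(0, len(texts)-1)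
def pvAltGo (pri1 pri2 : List String) : List (Int × String) → Option Int → Int → Int
  | [], pending, dflt =>
    match pending with
    | some i => i
    | none => dflt
  | (i, t) :: rest, pending, dflt =>
    if pri1.any (fun k => PySem.Str.isIn k t) then i
    else if pending.isNone && pri2.any (fun k => PySem.Str.isIn k t) then
      pvAltGo pri1 pri2 rest (some i) dflt
    else
      pvAltGo pri1 pri2 rest pending dflt

def choose_priority_index_py_alt (texts : List String) (pri1 : List String) (pri2 : List String) : Int :=
  pvAltGo pri1 pri2 (PySem.List.enumerate texts 0).reverse none (max 0 ((texts.length : Int) - 1))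

-- ===== PRECONDITION & SPEC =====
def Spec_choose_priority_index_py (texts : List String) (pri1 : List String) (pri2 : List String) (out : Int) : Prop := out = choose_priority_index_py_alt texts pri1 pri2
instance (texts : List String) (pri1 : List String) (pri2 : List String) (out : Int) : Decidable (Spec_choose_priority_index_py texts pri1 pri2 out) := by unfold Spec_choose_priority_index_py; infer_instance

-- ===== CLAIM (what is proved, stated in full; the proofs are below) =====
def Claim_equal_choose_priority_index_py : Prop := ∀ (texts : List String) (pri1 : List String) (pri2 : List String), Dom_choose_priority_index_py texts pri1 pri2 → Spec_choose_priority_index_py texts pri1 pri2 (choose_priority_index_py texts pri1 pri2)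

-- ===== LEMMAS AND PROOFS =====
-- first hit from the end = last hit from the front
theorem pv_find_reverse {α : Type} (p : α → Bool) (l : List α) :
    l.reverse.find? p = (l.filter p).getLast? := by
  rw [← List.head?_reverse, ← List.filter_reverse]
  generalize l.reverse = r
  induction r with
  | nil => simp
  | cons a r ih =>
    by_cases h : p a = true
    · rw [List.find?_cons_of_pos h, List.filter_cons_of_pos h, List.head?_cons]
    · rw [List.find?_cons_of_neg h, List.filter_cons_of_neg h, ih]

-- invariant of B's loop: first pri1 hit wins, else pending (which freezes once set), else the first pri2 hit, else dflt
theorem pvAltGo_eq (pri1 pri2 : List String) (r : List (Int × String)) (pending : Option Int) (dflt : Int) :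
    pvAltGo pri1 pri2 r pending dflt =
      match r.find? (fun p => pvAnyKeyIn pri1 p.2) with
      | some q => q.1
      | none =>
        match pending.orElse (fun _ => (r.find? (fun p => pvAnyKeyIn pri2 p.2)).map (·.1)) with
        | some i => i
        | none => dflt := by
  induction r generalizing pending with
  | nil => cases pending <;> rfl
  | cons a r ih =>
    obtain ⟨i, t⟩ := a
    rw [pvAltGo]
    by_cases h1 : (pri1.any fun k => PySem.Str.isIn k t) = true
    · rw [if_pos h1, List.find?_cons_of_pos (p := fun p : Int × String => pvAnyKeyIn pri1 p.2) (a := (i, t)) (l := r) h1]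
    · rw [if_neg h1, List.find?_cons_of_neg (p := fun p : Int × String => pvAnyKeyIn pri1 p.2) (a := (i, t)) (l := r) h1]
      by_cases h2 : (pending.isNone && pri2.any fun k => PySem.Str.isIn k t) = true
      · have hp : pending = none := by cases pending <;> simp_all
        have h2' : (pri2.any fun k => PySem.Str.isIn k t) = true := by simp_all
        rw [if_pos h2, ih, hp,
          List.find?_cons_of_pos (p := fun p : Int × String => pvAnyKeyIn pri2 p.2) (a := (i, t)) (l := r) h2']
        cases List.find? (fun p => pvAnyKeyIn pri1 p.2) r <;> simp [Option.orElse]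
      · rw [if_neg h2, ih]
        cases pending with
        | some j => cases List.find? (fun p => pvAnyKeyIn pri1 p.2) r <;> simp [Option.orElse]
        | none =>
          have h2' : ¬ (pri2.any fun k => PySem.Str.isIn k t) = true := by
            simpa [pvAnyKeyIn] using h2
          rw [List.find?_cons_of_neg (p := fun p : Int × String => pvAnyKeyIn pri2 p.2) (a := (i, t)) (l := r) h2']

theorem pvLastMatch_eq (texts keys : List String) :
    pvLastMatch texts keys =
      ((PySem.List.enumerate texts 0).reverse.find? (fun p => pvAnyKeyIn keys p.2)).map (·.1) := by
  rw [pvLastMatch, pv_find_reverse, List.getLast?_map]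

-- ===== VERDICT (by name: the statement is the Claim_ definition above) =====
theorem choose_priority_index_py_spec : Claim_equal_choose_priority_index_py := by
  intro texts pri1 pri2 _
  unfold Spec_choose_priority_index_py choose_priority_index_py choose_priority_index_py_alt
  rw [pvAltGo_eq, pvLastMatch_eq, pvLastMatch_eq]
  cases (PySem.List.enumerate texts 0).reverse.find? (fun p => pvAnyKeyIn pri1 p.2) with
  | some q => simp
  | none =>
    cases (PySem.List.enumerate texts 0).reverse.find? (fun p => pvAnyKeyIn pri2 p.2) with
    | some q => simp [Option.orElse]
    | none => simp [Option.orElse]
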